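-- pv_equiv track=rewrite | github.com/CroCooCn/bohack2025 | v1_gpt.py | prune_placements
-- ===== SOURCE A (Python) =====
-- from collections import Counter
--
-- N = 20
--
-- def torus_path(i0, j0, direction, L):
--     # direction: 0 -> right, 1 -> down
--     path = []
--     for t in range(L):
--         if direction == 0:
--             path.append((i0 % N, (j0 + t) % N))
--         else:
--             path.append(((i0 + t) % N, j0 % N))
--     return path
--
-- def all_placements_for_length(L):
--     # 20*20*2 = 800 个 placements
--     res = []
--     for i0 in range(N):
--         for j0 in range(N):
--             res.append(torus_path(i0, j0, 0, L))
--             res.append(torus_path(i0, j0, 1, L))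
--     return res
--
-- def build_initial_grid(strings):
--     cnt = Counter()
--     for s in strings:
--         cnt.update(s)
--     base = max("ABCDEFGH", key=lambda ch: cnt[ch])
--     grid = [[base for _ in range(N)] for _ in range(N)]
--     return grid
--
-- def placement_score(s, path, grid):
--     score = 0
--     for ell, (i, j) in enumerate(path):
--         if grid[i][j] == s[ell]:
--             score += 1
--     return score
--
-- def prune_placements(strings, K=20, Lmin=1):
--     grid = build_initial_grid(strings)
--     placements = []
--     cache = {}  # length -> all placements (800) cache
--
--     for s in strings:
--         L = len(s)
--         if L < Lmin:
--             placements.append([])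
--             continue
--
--         if L not in cache:
--             cache[L] = all_placements_for_length(L)
--         allp = cache[L]
--
--         scored = [(placement_score(s, path, grid), path) for path in allp]
--         scored.sort(key=lambda x: x[0], reverse=True)
--         placements.append([path for _, path in scored[:K]])
--     return placements
-- ===== SOURCE B (Python) =====
-- # B: the initial grid is uniform (one repeated base letter), so every placement of a given
-- # length gets the same score; the stable reverse sort is then a no-op and scored[:K] is just
-- # the first K placements in enumeration order.  B drops the grid/scoring/sorting entirely and
-- # caches the already-pruned list per length, so repeated lengths cost O(1).
-- N = 20
--
-- def _candidates(L):
--     return [[(i0, (j0 + t) % N) for t in range(L)] if d == 0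
--             else [((i0 + t) % N, j0) for t in range(L)]
--             for i0 in range(N) for j0 in range(N) for d in (0, 1)]
--
-- def prune_placements(strings, K=20, Lmin=1):
--     pruned_by_len = {}
--     out = []
--     for s in strings:
--         L = len(s)
--         if L < Lmin:
--             out.append([])
--             continue
--         if L not in pruned_by_len:
--             pruned_by_len[L] = _candidates(L)[:K]
--         out.append(pruned_by_len[L])
--     return out
-- ===== Notes on version B (the rewrite author's own statement) =====
-- stated objective: faster
-- what changed: The initial grid is uniform, so all 800 placements of a length score the same and the stable reverse sort is a no-op; B skips the grid, the scoring and the sort and returns the first K placements per length directly, caching the pruned list per length.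
import Mathlib
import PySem

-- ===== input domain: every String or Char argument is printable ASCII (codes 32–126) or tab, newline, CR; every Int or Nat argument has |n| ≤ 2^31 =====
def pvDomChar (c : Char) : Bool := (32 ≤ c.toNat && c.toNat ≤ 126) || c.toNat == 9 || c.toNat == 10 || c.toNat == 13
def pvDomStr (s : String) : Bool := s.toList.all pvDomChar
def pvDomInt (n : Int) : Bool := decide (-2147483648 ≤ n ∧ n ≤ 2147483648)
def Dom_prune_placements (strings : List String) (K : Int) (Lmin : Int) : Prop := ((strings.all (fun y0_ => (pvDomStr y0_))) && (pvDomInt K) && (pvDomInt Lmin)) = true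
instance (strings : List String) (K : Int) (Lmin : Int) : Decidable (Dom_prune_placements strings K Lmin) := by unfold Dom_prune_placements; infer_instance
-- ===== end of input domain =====

-- B removes A's uniform-grid scoring and the (stable, hence no-op) reverse sort and returns the
-- first K placements per length directly, caching the pruned list per length: faster.

-- ===== PORT A =====
def pyN : Int := 20   -- module constant N = 20

def torus_path (i0 j0 direction L : Int) : List (Int × Int) :=
  (PySem.List.pyRange 0 L).foldl (fun path t =>
    if direction = 0 then path ++ [(PySem.Int.mod i0 pyN, PySem.Int.mod (j0 + t) pyN)]
    else path ++ [(PySem.Int.mod (i0 + t) pyN, PySem.Int.mod j0 pyN)]) []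

def all_placements_for_length (L : Int) : List (List (Int × Int)) :=
  (PySem.List.pyRange 0 pyN).foldl (fun res i0 =>
    (PySem.List.pyRange 0 pyN).foldl (fun res j0 =>
      res ++ [torus_path i0 j0 0 L] ++ [torus_path i0 j0 1 L]) res) []

def build_initial_grid (strings : List String) : List (List Char) :=
  let cnt : PySem.Dict Char Int := strings.foldl (fun cnt s =>
    s.toList.foldl (fun d c => d.modify c 0 (· + 1)) cnt) PySem.Dict.empty
  let base := PySem.List.maxD "ABCDEFGH".toList (fun ch => cnt.getD ch 0) 'A'
  (PySem.List.pyRange 0 pyN).map (fun _ => (PySem.List.pyRange 0 pyN).map (fun _ => base))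

-- grid[i][j] and s[ell]: in A every reached index is in range (coordinates are % 20, ell < len(s)),
-- so both pyGet? are `some` there and comparing the Options is exactly Python's char comparison.
def placement_score (s : List Char) (path : List (Int × Int)) (grid : List (List Char)) : Int :=
  (PySem.List.enumerate path).foldl (fun score p =>
    if (PySem.List.pyGet? grid p.2.1).bind (fun row => PySem.List.pyGet? row p.2.2)
         = PySem.List.pyGet? s p.1
    then score + 1 else score) 0

-- the body of A's `for s in strings` loop (state = (placements, cache))
def aStep (grid : List (List Char)) (K Lmin : Int)
    (st : List (List (List (Int × Int))) × PySem.Dict Int (List (List (Int × Int)))) (s : String) :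
    List (List (List (Int × Int))) × PySem.Dict Int (List (List (Int × Int))) :=
  let L : Int := PySem.Str.len s
  if L < Lmin then (st.1 ++ [[]], st.2)
  else
    let cache := if st.2.contains L then st.2 else st.2.insert L (all_placements_for_length L)
    let allp := cache.getD L []       -- cache[L]: always present here
    let scored := allp.map (fun path => (placement_score s.toList path grid, path))
    let sortedS := PySem.List.sorted scored (fun x => x.1) true
    (st.1 ++ [(PySem.List.slice sortedS none (some K)).map (fun x => x.2)], cache)

def prune_placements (strings : List String) (K : Int) (Lmin : Int) : List (List (List (Int × Int))) :=
  let grid := build_initial_grid strings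
  (strings.foldl (aStep grid K Lmin) ([], PySem.Dict.empty)).1

-- ===== PORT B =====
def prune_candidates (L : Int) : List (List (Int × Int)) :=
  (PySem.List.pyRange 0 pyN).flatMap (fun i0 =>
    (PySem.List.pyRange 0 pyN).flatMap (fun j0 =>
      ([0, 1] : List Int).map (fun d =>
        if d = 0 then (PySem.List.pyRange 0 L).map (fun t => (i0, PySem.Int.mod (j0 + t) pyN))
        else (PySem.List.pyRange 0 L).map (fun t => (PySem.Int.mod (i0 + t) pyN, j0)))))

-- the body of B's `for s in strings` loop (state = (out, pruned_by_len))
def bStep (K Lmin : Int)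
    (st : List (List (List (Int × Int))) × PySem.Dict Int (List (List (Int × Int)))) (s : String) :
    List (List (List (Int × Int))) × PySem.Dict Int (List (List (Int × Int))) :=
  let L : Int := PySem.Str.len s
  if L < Lmin then (st.1 ++ [[]], st.2)
  else
    let cache := if st.2.contains L then st.2
      else st.2.insert L (PySem.List.slice (prune_candidates L) none (some K))
    (st.1 ++ [cache.getD L []], cache)

def prune_placements_alt (strings : List String) (K : Int) (Lmin : Int) : List (List (List (Int × Int))) :=
  (strings.foldl (bStep K Lmin) ([], PySem.Dict.empty)).1

-- ===== PRECONDITION & SPEC =====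
def Spec_prune_placements (strings : List String) (K : Int) (Lmin : Int) (out : List (List (List (Int × Int)))) : Prop := out = prune_placements_alt strings K Lmin
instance (strings : List String) (K : Int) (Lmin : Int) (out : List (List (List (Int × Int)))) : Decidable (Spec_prune_placements strings K Lmin out) := by unfold Spec_prune_placements; infer_instance

-- ===== CLAIM (what is proved, stated in full; the proofs are below) =====
def Claim_equal_prune_placements : Prop := ∀ (strings : List String) (K : Int) (Lmin : Int), Dom_prune_placements strings K Lmin → Spec_prune_placements strings K Lmin (prune_placements strings K Lmin)

-- ===== LEMMAS AND PROOFS =====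

-- slice [:K] commutes with map
theorem pv_slice_map {α β : Type} (f : α → β) (xs : List α) (K : Int) :
    PySem.List.slice (xs.map f) none (some K) = (PySem.List.slice xs none (some K)).map f := by
  by_cases h : 0 ≤ K
  · rw [PySem.List.slice_to _ h, PySem.List.slice_to _ h, List.map_take]
  · have hk : 0 < (-K).toNat := by omega
    have hK : K = -((-K).toNat : Int) := by omega
    rw [hK, PySem.List.slice_to_neg_natCast _ _ hk, PySem.List.slice_to_neg_natCast _ _ hk,
      List.map_take, List.length_map]

theorem pv_enumerate_map {α β : Type} (f : α → β) (xs : List α) (s : Int) :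
    PySem.List.enumerate (xs.map f) s = (PySem.List.enumerate xs s).map (fun p => (p.1, f p.2)) := by
  induction xs generalizing s with
  | nil => simp [PySem.List.enumerate_nil]
  | cons x t ih => simp [PySem.List.enumerate_cons, ih]

theorem pv_mod_small {a : Int} (h0 : 0 ≤ a) (h1 : a < 20) : PySem.Int.mod a 20 = a := by
  rw [PySem.Int.mod_eq_emod_of_pos (by norm_num)]
  exact Int.emod_eq_of_lt h0 h1

-- the two torus paths, direction reduced (raw: no bounds needed)
theorem pv_torus0_raw (i0 j0 L : Int) :
    torus_path i0 j0 0 L = (PySem.List.pyRange 0 L).map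
      (fun t => (PySem.Int.mod i0 pyN, PySem.Int.mod (j0 + t) pyN)) := by
  unfold torus_path
  simp only [reduceIte]
  rw [PySem.List.foldl_append_singleton_eq_map, List.nil_append]

theorem pv_torus1_raw (i0 j0 L : Int) :
    torus_path i0 j0 1 L = (PySem.List.pyRange 0 L).map
      (fun t => (PySem.Int.mod (i0 + t) pyN, PySem.Int.mod j0 pyN)) := by
  unfold torus_path
  simp only [reduceIte, one_ne_zero]
  rw [PySem.List.foldl_append_singleton_eq_map, List.nil_append]

theorem pv_torus0 (i0 j0 L : Int) (h0 : 0 ≤ i0) (h1 : i0 < 20) :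
    torus_path i0 j0 0 L = (PySem.List.pyRange 0 L).map (fun t => (i0, PySem.Int.mod (j0 + t) pyN)) := by
  rw [pv_torus0_raw]
  simp only [pyN, pv_mod_small h0 h1]

theorem pv_torus1 (i0 j0 L : Int) (h0 : 0 ≤ j0) (h1 : j0 < 20) :
    torus_path i0 j0 1 L = (PySem.List.pyRange 0 L).map (fun t => (PySem.Int.mod (i0 + t) pyN, j0)) := by
  rw [pv_torus1_raw]
  simp only [pyN, pv_mod_small h0 h1]

-- A's 800 placements as a flatMap
theorem pv_all_flat (L : Int) :
    all_placements_for_length L = (PySem.List.pyRange 0 pyN).flatMap (fun i0 =>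
      (PySem.List.pyRange 0 pyN).flatMap (fun j0 =>
        [torus_path i0 j0 0 L, torus_path i0 j0 1 L])) := by
  unfold all_placements_for_length
  simp only [List.append_assoc, List.singleton_append,
    PySem.List.foldl_append_eq_flatMap, List.nil_append]

-- A's candidate list equals B's
theorem pv_all_eq_cand (L : Int) : all_placements_for_length L = prune_candidates L := by
  rw [pv_all_flat, prune_candidates]
  apply List.flatMap_congr
  intro i0 hi0
  rw [PySem.List.mem_pyRange_one] at hi0
  apply List.flatMap_congr
  intro j0 hj0
  rw [PySem.List.mem_pyRange_one] at hj0
  simp only [List.map_cons, List.map_nil, reduceIte, one_ne_zero]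
  rw [pv_torus0 i0 j0 L hi0.1 (by simpa [pyN] using hi0.2),
    pv_torus1 i0 j0 L hj0.1 (by simpa [pyN] using hj0.2)]

-- every placement of A is a torus path
theorem pv_mem_all (L : Int) {path : List (Int × Int)} (h : path ∈ all_placements_for_length L) :
    ∃ i0 j0 d, (d = 0 ∨ d = 1) ∧ path = torus_path i0 j0 d L := by
  rw [pv_all_flat] at h
  simp only [List.mem_flatMap, List.mem_cons] at h
  obtain ⟨i0, _, j0, _, hp⟩ := h
  rcases hp with hp | hp | hp
  · exact ⟨i0, j0, 0, Or.inl rfl, hp⟩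
  · exact ⟨i0, j0, 1, Or.inr rfl, hp⟩
  · cases hp

-- the common score of every placement of length L on the uniform grid
def pvScoreVal (s : List Char) (L : Int) (b : Char) : Int :=
  (PySem.List.enumerate (PySem.List.pyRange 0 L)).foldl (fun score p =>
    if some b = PySem.List.pyGet? s p.1 then score + 1 else score) 0

theorem pv_uniform_lookup (b : Char) (x y : Int) :
    (PySem.List.pyGet? ((PySem.List.pyRange 0 pyN).map
        (fun _ => (PySem.List.pyRange 0 pyN).map (fun _ => b))) (PySem.Int.mod x pyN)).bind
      (fun row => PySem.List.pyGet? row (PySem.Int.mod y pyN)) = some b := by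
  have h0 : (0:Int) < pyN := by norm_num [pyN]
  have hlen : ∀ {γ : Type} (z : γ), ((PySem.List.pyRange 0 pyN).map (fun _ => z)).length = 20 := by
    intro γ z; simp [PySem.List.length_pyRange_one, pyN]
  rw [PySem.List.pyGet?_eq_some_getElem _ (PySem.Int.mod_nonneg x h0)
      (by rw [hlen]; exact_mod_cast PySem.Int.mod_lt x h0)]
  rw [Option.bind_some, List.getElem_map]
  rw [PySem.List.pyGet?_eq_some_getElem _ (PySem.Int.mod_nonneg y h0)
      (by rw [hlen]; exact_mod_cast PySem.Int.mod_lt y h0)]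
  rw [List.getElem_map]

theorem pv_score_uniform (s : List Char) (i0 j0 L d : Int) (hd : d = 0 ∨ d = 1) (b : Char) :
    placement_score s (torus_path i0 j0 d L)
      ((PySem.List.pyRange 0 pyN).map (fun _ => (PySem.List.pyRange 0 pyN).map (fun _ => b)))
    = pvScoreVal s L b := by
  rcases hd with rfl | rfl
  · rw [pv_torus0_raw]
    unfold placement_score pvScoreVal
    rw [pv_enumerate_map, List.foldl_map]
    apply PySem.List.foldl_congr_mem
    intro acc p _
    simp only
    rw [pv_uniform_lookup]
  · rw [pv_torus1_raw]
    unfold placement_score pvScoreVal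
    rw [pv_enumerate_map, List.foldl_map]
    apply PySem.List.foldl_congr_mem
    intro acc p _
    simp only
    rw [pv_uniform_lookup]

-- the uniform grid, its base abstracted
theorem pv_grid_shape (strings : List String) :
    ∃ b, build_initial_grid strings =
      (PySem.List.pyRange 0 pyN).map (fun _ => (PySem.List.pyRange 0 pyN).map (fun _ => b)) := by
  exact ⟨_, rfl⟩

-- per-string: A's scored/sorted/sliced block is B's sliced candidate list
theorem pv_pruned_eq (strings : List String) (s : String) (K L : Int) :
    (PySem.List.slice (PySem.List.sorted ((all_placements_for_length L).map
        (fun path => (placement_score s.toList path (build_initial_grid strings), path)))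
        (fun x => x.1) true) none (some K)).map (fun x => x.2)
    = PySem.List.slice (prune_candidates L) none (some K) := by
  obtain ⟨b, hb⟩ := pv_grid_shape strings
  have hmap : (all_placements_for_length L).map
      (fun path => (placement_score s.toList path (build_initial_grid strings), path))
      = (all_placements_for_length L).map (fun path => (pvScoreVal s.toList L b, path)) := by
    apply List.map_congr_left
    intro path hp
    obtain ⟨i0, j0, d, hd, rfl⟩ := pv_mem_all L hp
    rw [hb, pv_score_uniform s.toList i0 j0 L d hd b]
  rw [hmap, PySem.List.sorted_rev_eq_self_of_pairwise _ _ (by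
    rw [List.pairwise_map]
    exact List.pairwise_of_forall_sublist fun {a b} _ => le_refl _),
    pv_slice_map, List.map_map]
  simp [pv_all_eq_cand]

-- cache invariant tying A's cache (full 800 lists) to B's (pruned lists)
def pvCacheInv (K : Int) (cA cB : PySem.Dict Int (List (List (Int × Int)))) : Prop :=
  ∀ L, (cA.get? L = none ∧ cB.get? L = none) ∨
       (cA.get? L = some (all_placements_for_length L) ∧
        cB.get? L = some (PySem.List.slice (prune_candidates L) none (some K)))

-- one loop step: equal appended output, and the invariant is preserved
theorem pv_step_fst (strings0 : List String) (s : String) (K Lmin : Int)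
    (acc : List (List (List (Int × Int)))) (cA cB : PySem.Dict Int (List (List (Int × Int))))
    (hinv : pvCacheInv K cA cB) :
    (aStep (build_initial_grid strings0) K Lmin (acc, cA) s).1 = (bStep K Lmin (acc, cB) s).1 := by
  simp only [aStep, bStep, PySem.Str.len_eq]
  by_cases hL : ((s.toList.length : Int) < Lmin)
  · rw [if_pos hL, if_pos hL]
  · rw [if_neg hL, if_neg hL]
    have hcont : cA.contains ((s.toList.length : Int)) = cB.contains ((s.toList.length : Int)) := by
      rw [PySem.Dict.contains_eq_isSome_get?, PySem.Dict.contains_eq_isSome_get?]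
      rcases hinv ((s.toList.length : Int)) with ⟨h1, h2⟩ | ⟨h1, h2⟩ <;> (rw [h1, h2]; try simp only [Option.isSome_some])
    by_cases hc : cA.contains ((s.toList.length : Int)) = true
    · have hcB : cB.contains ((s.toList.length : Int)) = true := hcont ▸ hc
      rw [if_pos hc, if_pos hcB]
      rcases hinv ((s.toList.length : Int)) with ⟨h1, _⟩ | ⟨h1, h2⟩
      · rw [PySem.Dict.contains_eq_isSome_get?, h1] at hc; cases hc
      · simp only
        rw [PySem.Dict.getD_eq_get?_getD, h1, PySem.Dict.getD_eq_get?_getD, h2]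
        simp only [Option.getD_some]
        rw [pv_pruned_eq strings0 s K ((s.toList.length : Int))]
    · have hcB : ¬ (cB.contains ((s.toList.length : Int)) = true) := by rw [← hcont]; exact hc
      rw [if_neg hc, if_neg hcB]
      simp only
      rw [PySem.Dict.getD_eq_get?_getD, PySem.Dict.get?_insert_self,
        PySem.Dict.getD_eq_get?_getD, PySem.Dict.get?_insert_self]
      simp only [Option.getD_some]
      rw [pv_pruned_eq strings0 s K ((s.toList.length : Int))]

theorem pv_step_inv (strings0 : List String) (s : String) (K Lmin : Int)
    (acc : List (List (List (Int × Int)))) (cA cB : PySem.Dict Int (List (List (Int × Int))))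
    (hinv : pvCacheInv K cA cB) :
    pvCacheInv K (aStep (build_initial_grid strings0) K Lmin (acc, cA) s).2
      (bStep K Lmin (acc, cB) s).2 := by
  simp only [aStep, bStep, PySem.Str.len_eq]
  by_cases hL : ((s.toList.length : Int) < Lmin)
  · rw [if_pos hL, if_pos hL]; exact hinv
  · rw [if_neg hL, if_neg hL]
    have hcont : cA.contains ((s.toList.length : Int)) = cB.contains ((s.toList.length : Int)) := by
      rw [PySem.Dict.contains_eq_isSome_get?, PySem.Dict.contains_eq_isSome_get?]
      rcases hinv ((s.toList.length : Int)) with ⟨h1, h2⟩ | ⟨h1, h2⟩ <;> (rw [h1, h2]; try simp only [Option.isSome_some])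
    by_cases hc : cA.contains ((s.toList.length : Int)) = true
    · have hcB : cB.contains ((s.toList.length : Int)) = true := hcont ▸ hc
      rw [if_pos hc, if_pos hcB]; exact hinv
    · have hcB : ¬ (cB.contains ((s.toList.length : Int)) = true) := by rw [← hcont]; exact hc
      rw [if_neg hc, if_neg hcB]
      dsimp only
      intro L'
      by_cases hLL : L' = ((s.toList.length : Int))
      · subst hLL
        exact Or.inr ⟨PySem.Dict.get?_insert_self _ _ _, PySem.Dict.get?_insert_self _ _ _⟩
      · rcases hinv L' with ⟨h1, h2⟩ | ⟨h1, h2⟩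
        · exact Or.inl ⟨by rw [PySem.Dict.get?_insert_of_ne _ _ hLL, h1],
            by rw [PySem.Dict.get?_insert_of_ne _ _ hLL, h2]⟩
        · exact Or.inr ⟨by rw [PySem.Dict.get?_insert_of_ne _ _ hLL, h1],
            by rw [PySem.Dict.get?_insert_of_ne _ _ hLL, h2]⟩

theorem pv_loop_eq (strings0 : List String) (K Lmin : Int) :
    ∀ (rest : List String) (acc : List (List (List (Int × Int))))
      (cA cB : PySem.Dict Int (List (List (Int × Int)))),
      pvCacheInv K cA cB →
      (rest.foldl (aStep (build_initial_grid strings0) K Lmin) (acc, cA)).1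
        = (rest.foldl (bStep K Lmin) (acc, cB)).1 := by
  intro rest
  induction rest with
  | nil => intro acc cA cB _; rfl
  | cons s t ih =>
    intro acc cA cB hinv
    rw [List.foldl_cons, List.foldl_cons]
    have h2 : bStep K Lmin (acc, cB) s
        = ((aStep (build_initial_grid strings0) K Lmin (acc, cA) s).1,
           (bStep K Lmin (acc, cB) s).2) :=
      Prod.ext (pv_step_fst strings0 s K Lmin acc cA cB hinv).symm rfl
    rw [h2]
    exact ih _ _ _ (pv_step_inv strings0 s K Lmin acc cA cB hinv)

-- ===== VERDICT (by name: the statement is the Claim_ definition above) =====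
theorem prune_placements_spec : Claim_equal_prune_placements := by
  intro strings K Lmin _
  unfold Spec_prune_placements prune_placements prune_placements_alt
  exact pv_loop_eq strings K Lmin strings [] _ _ (fun L => Or.inl ⟨rfl, rfl⟩)
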